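-- pv_equiv track=rewrite | github.com/shall-ffn/esizzle | lambda/pdf-processor/processors/splitting_processor.py | _calculate_split_ranges
-- ===== SOURCE A (Python) =====
-- from typing import List, Dict, Any, Tuple
--
-- def _calculate_split_ranges(page_breaks: List[Dict[str, Any]], total_pages: int) -> List[Tuple[int, int]]:
--     """Calculate page ranges for document splits"""
--
--     ranges = []
--
--     # Add front section if first break is not at page 0
--     if page_breaks[0]['PageIndex'] > 0:
--         ranges.append((0, page_breaks[0]['PageIndex']))
--
--     # Add ranges for each break
--     for i, page_break in enumerate(page_breaks):
--         start_page = page_break['PageIndex']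
--         end_page = page_breaks[i + 1]['PageIndex'] if i + 1 < len(page_breaks) else total_pages
--         ranges.append((start_page, end_page))
--
--     return ranges
-- ===== SOURCE B (Python) =====
-- def _calculate_split_ranges(page_breaks, total_pages):
--     """Calculate page ranges for document splits"""
--     ranges = []
--     end = total_pages
--     for page_break in reversed(page_breaks):
--         start = page_break['PageIndex']
--         ranges.append((start, end))
--         end = start
--     if end > 0:
--         ranges.append((0, end))
--     ranges.reverse()
--     return ranges
-- ===== Notes on version B (the rewrite author's own statement) =====
-- stated objective: alternative
-- what changed: B traverses the break list backwards with a 'next boundary' accumulator (each section's end is the previously seen start, seeded with total_pages), emitting pairs in reverse and reversing once at the end; A scans forwards with an index-ahead lookup and a separate front-section special case.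
import Mathlib
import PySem

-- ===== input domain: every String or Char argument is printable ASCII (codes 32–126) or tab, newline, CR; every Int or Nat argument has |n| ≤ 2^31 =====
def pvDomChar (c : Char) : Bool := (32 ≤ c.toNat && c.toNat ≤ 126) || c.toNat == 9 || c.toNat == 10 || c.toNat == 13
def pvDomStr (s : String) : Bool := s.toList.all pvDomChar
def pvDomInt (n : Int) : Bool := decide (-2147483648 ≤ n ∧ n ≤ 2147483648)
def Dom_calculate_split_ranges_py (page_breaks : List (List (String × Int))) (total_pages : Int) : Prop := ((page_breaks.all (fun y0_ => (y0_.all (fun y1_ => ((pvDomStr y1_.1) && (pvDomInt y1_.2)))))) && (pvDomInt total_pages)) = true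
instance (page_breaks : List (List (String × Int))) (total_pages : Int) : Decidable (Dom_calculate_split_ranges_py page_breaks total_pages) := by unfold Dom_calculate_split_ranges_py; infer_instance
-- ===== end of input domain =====

-- ===== PORT A =====
-- B replaces A's forward index-ahead scan (plus front special case) by a backward pass with a
-- 'next boundary' accumulator; objective: alternative (same O(n) cost). Neither mutates the input.
-- dict lookup d['PageIndex'] -> first match in the association list; a missing key (KeyError)
-- and empty page_breaks (IndexError) are excluded by Pre_ below, where the port uses 0 / [].
def pbIdx (d : List (String × Int)) : Int := (d.lookup "PageIndex").getD 0

def calculate_split_ranges_py (page_breaks : List (List (String × Int))) (total_pages : Int) : List (Int × Int) :=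
  match page_breaks with
  | [] => []  -- Python raises IndexError here (outside Pre_)
  | d0 :: _ =>
    -- front section if first break is not at page 0
    let ranges : List (Int × Int) := if pbIdx d0 > 0 then [((0 : Int), pbIdx d0)] else []
    -- for i, page_break in enumerate(page_breaks): append (start, end)
    (List.range page_breaks.length).foldl (fun acc i =>
      let start_page := pbIdx (page_breaks.getD i [])
      let end_page := if i + 1 < page_breaks.length then pbIdx (page_breaks.getD (i + 1) []) else total_pages
      acc ++ [(start_page, end_page)]) ranges

-- ===== PORT B =====
-- backward pass: for page_break in reversed(page_breaks): append (start, end); end := start;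
-- then the optional (0, end) section, then one final reverse.
def calculate_split_ranges_py_alt (page_breaks : List (List (String × Int))) (total_pages : Int) : List (Int × Int) :=
  let st := page_breaks.reverse.foldl
    (fun (st : List (Int × Int) × Int) page_break =>
      let start := pbIdx page_break
      (st.1 ++ [(start, st.2)], start)) ([], total_pages)
  let ranges := if st.2 > 0 then st.1 ++ [((0 : Int), st.2)] else st.1
  ranges.reverse

-- ===== PRECONDITION & SPEC =====
-- Pre_: page_breaks nonempty (else A raises IndexError on page_breaks[0]) and every break dict
-- has the key 'PageIndex' (else KeyError); exactly the inputs on which Python A returns normally.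
def Pre_calculate_split_ranges_py (page_breaks : List (List (String × Int))) (total_pages : Int) : Prop :=
  page_breaks ≠ [] ∧ ∀ d ∈ page_breaks, "PageIndex" ∈ d.map Prod.fst
instance (page_breaks : List (List (String × Int))) (total_pages : Int) : Decidable (Pre_calculate_split_ranges_py page_breaks total_pages) := by unfold Pre_calculate_split_ranges_py; infer_instance

def pvWitness_calculate_split_ranges_py : (List (List (String × Int))) × Int :=
  ([[("PageIndex", 2)], [("PageIndex", 5)]], 9)

def Spec_calculate_split_ranges_py (page_breaks : List (List (String × Int))) (total_pages : Int) (out : List (Int × Int)) : Prop := out = calculate_split_ranges_py_alt page_breaks total_pages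
instance (page_breaks : List (List (String × Int))) (total_pages : Int) (out : List (Int × Int)) : Decidable (Spec_calculate_split_ranges_py page_breaks total_pages out) := by unfold Spec_calculate_split_ranges_py; infer_instance

-- ===== CLAIM (what is proved, stated in full; the proofs are below) =====
def Claim_equal_calculate_split_ranges_py : Prop := ∀ (page_breaks : List (List (String × Int))) (total_pages : Int), Dom_calculate_split_ranges_py page_breaks total_pages → Pre_calculate_split_ranges_py page_breaks total_pages → Spec_calculate_split_ranges_py page_breaks total_pages (calculate_split_ranges_py page_breaks total_pages)

-- ===== LEMMAS AND PROOFS =====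

-- A's enumerate loop, expressed as a map over the index range, equals consecutive pairing of
-- the boundary list bs against its shifted-by-one version closed off by total_pages.
lemma range_map_eq_zip (bs : List Int) (tp : Int) :
    (List.range bs.length).map (fun i =>
        (bs.getD i 0, if i + 1 < bs.length then bs.getD (i + 1) 0 else tp))
      = bs.zip (bs.tail ++ [tp]) := by
  apply List.ext_getElem
  · simp [List.length_zip]
    cases bs <;> simp
  · intro i h1 h2
    simp only [List.length_map, List.length_range] at h1
    simp only [List.getElem_map, List.getElem_range, List.getElem_zip, Prod.mk.injEq]
    constructor
    · simp [List.getD_eq_getElem?_getD, List.getElem?_eq_getElem h1]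
    · by_cases hlt : i + 1 < bs.length
      · simp [hlt, List.getD_eq_getElem?_getD,
          List.getElem_append_left (show i < bs.tail.length by simp; omega),
          List.getElem_tail]
      · have hi : i = bs.length - 1 := by omega
        have htl : bs.tail.length ≤ i := by simp; omega
        simp [hlt, List.getElem_append_right htl]

-- B's backward fold, pulled back through reverse into a foldr over the boundary list:
-- for nonempty bs it produces (reversed pairs, first boundary).
def pairsFoldr (bs : List Int) (tp : Int) : List (Int × Int) × Int :=
  bs.foldr (fun b st => (st.1 ++ [(b, st.2)], b)) ([], tp)

lemma pairsFoldr_char (b : Int) (bs : List Int) (tp : Int) :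
    pairsFoldr (b :: bs) tp
      = (((b :: bs).zip (bs ++ [tp])).reverse, b) := by
  induction bs generalizing b with
  | nil => simp [pairsFoldr]
  | cons c cs ih =>
    have h := congrArg Prod.fst (ih c)
    simp only [pairsFoldr, List.foldr_cons] at h ⊢
    simp only [List.cons_append, List.zip_cons_cons, List.reverse_cons]
    rw [← h]

-- A's port equals the canonical "front section ++ consecutive pairs" form.
lemma portA_canon (d0 : List (String × Int)) (rest : List (List (String × Int))) (tp : Int) :
    calculate_split_ranges_py (d0 :: rest) tp
      = (if pbIdx d0 > 0 then [((0 : Int), pbIdx d0)] else [])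
        ++ ((d0 :: rest).map pbIdx).zip (((d0 :: rest).map pbIdx).tail ++ [tp]) := by
  unfold calculate_split_ranges_py
  simp only
  rw [PySem.List.foldl_append_singleton_eq_map]
  congr 1
  have hmapidx : ∀ (i : Nat), i < (d0 :: rest).length →
      pbIdx ((d0 :: rest).getD i []) = ((d0 :: rest).map pbIdx).getD i 0 := by
    intro i hi
    have hi' : i < ((d0 :: rest).map pbIdx).length := by simpa using hi
    rw [List.getD_eq_getElem?_getD, List.getD_eq_getElem?_getD,
      List.getElem?_eq_getElem hi, List.getElem?_eq_getElem hi']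
    simp only [Option.getD_some]
    exact (List.getElem_map pbIdx).symm
  rw [← range_map_eq_zip ((d0 :: rest).map pbIdx) tp]
  simp only [List.length_map]
  apply List.map_congr_left
  intro i hi
  rw [List.mem_range] at hi
  rw [hmapidx i hi]
  by_cases hlt : i + 1 < (d0 :: rest).length
  · rw [if_pos hlt, if_pos (by simpa using hlt), hmapidx (i+1) hlt]
  · rw [if_neg hlt, if_neg (by simpa using hlt)]

-- B's port equals the same canonical form on nonempty input.
lemma portB_canon (d0 : List (String × Int)) (rest : List (List (String × Int))) (tp : Int) :
    calculate_split_ranges_py_alt (d0 :: rest) tp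
      = (if pbIdx d0 > 0 then [((0 : Int), pbIdx d0)] else [])
        ++ ((d0 :: rest).map pbIdx).zip (((d0 :: rest).map pbIdx).tail ++ [tp]) := by
  unfold calculate_split_ranges_py_alt
  simp only [List.foldl_reverse]
  have hfold : (d0 :: rest).foldr
      (fun page_break (st : List (Int × Int) × Int) => (st.1 ++ [(pbIdx page_break, st.2)], pbIdx page_break))
      ([], tp)
      = pairsFoldr ((d0 :: rest).map pbIdx) tp := by
    simp [pairsFoldr, List.foldr_map]
  rw [hfold]
  simp only [List.map_cons]
  rw [pairsFoldr_char (pbIdx d0) (rest.map pbIdx) tp]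
  by_cases h0 : pbIdx d0 > 0 <;> simp [h0]

-- ===== VERDICT (by name: the statement is the Claim_ definition above) =====
theorem calculate_split_ranges_py_spec : Claim_equal_calculate_split_ranges_py := by
  intro page_breaks total_pages _ hpre
  unfold Spec_calculate_split_ranges_py
  obtain ⟨hne, -⟩ := hpre
  cases page_breaks with
  | nil => exact absurd rfl hne
  | cons d0 rest => rw [portA_canon, portB_canon]
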